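-- pv_equiv track=rewrite | github.com/maxemil/rickettsiales-evolution | T4SS/get_locus_tag.py | cut_locs_regions
-- ===== SOURCE A (Python) =====
-- def cut_locs_regions(locs):
--     regions = []
--     locs = sorted(locs)
--     start = locs[0]
--     end = locs[0]
--     for i, l in enumerate(locs):
--         if not l > end + 10000:
--             end = l
--         else:
--             regions.append((start, end))
--             start = l
--             end = l
--     regions.append((start, end))
--     return regions
-- ===== SOURCE B (Python) =====
-- def cut_locs_regions(locs):
--     s = sorted(locs)
--     pairs = list(zip(s, s[1:]))
--     starts = [s[0]] + [b for a, b in pairs if b - a > 10000]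
--     ends = [a for a, b in pairs if b - a > 10000] + [s[-1]]
--     return list(zip(starts, ends))
-- ===== Notes on version B (the rewrite author's own statement) =====
-- stated objective: alternative
-- what changed: B keeps no running region state and builds no groups: it extracts the boundary lists directly (region starts = s[0] plus right ends of gap pairs, region ends = left ends of gap pairs plus s[-1]) as two comprehensions over consecutive pairs and zips them together.
import Mathlib
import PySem

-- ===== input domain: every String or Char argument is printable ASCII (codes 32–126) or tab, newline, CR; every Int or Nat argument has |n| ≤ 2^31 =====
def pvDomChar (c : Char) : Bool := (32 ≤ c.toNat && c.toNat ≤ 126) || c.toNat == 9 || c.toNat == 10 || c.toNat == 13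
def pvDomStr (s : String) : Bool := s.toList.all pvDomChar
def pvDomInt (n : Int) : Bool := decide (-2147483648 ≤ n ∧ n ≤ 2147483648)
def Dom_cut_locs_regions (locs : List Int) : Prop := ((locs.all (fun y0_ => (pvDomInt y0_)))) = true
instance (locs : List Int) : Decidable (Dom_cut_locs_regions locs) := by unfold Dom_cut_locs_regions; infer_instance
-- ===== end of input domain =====

-- B keeps no running region state: it extracts the boundary lists (starts / ends) from the gap pairs and zips them; alternative decomposition, same cost.

-- ===== PORT A =====
-- loop body of A: either extend the current region's end, or flush (start, end) and start a new one
def pvStepA (acc : List (Int × Int) × Int × Int) (l : Int) : List (Int × Int) × Int × Int :=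
  if ¬ (l > acc.2.2 + 10000) then (acc.1, acc.2.1, l)
  else (acc.1 ++ [(acc.2.1, acc.2.2)], l, l)

def cut_locs_regions (locs : List Int) : List (Int × Int) :=
  let s := PySem.List.sorted locs (fun x => x)
  let start := (PySem.List.pyGet? s 0).getD 0   -- locs[0]; Pre_ excludes the empty list (IndexError)
  let st := s.foldl pvStepA ([], start, start)
  st.1 ++ [(st.2.1, st.2.2)]

-- ===== PORT B =====
def cut_locs_regions_alt (locs : List Int) : List (Int × Int) :=
  let s := PySem.List.sorted locs (fun x => x)
  let pairs := s.zip (s.drop 1)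
  let starts := [(PySem.List.pyGet? s 0).getD 0] ++   -- s[0]; Pre_ excludes the empty list (IndexError)
    (pairs.filter (fun q => q.2 - q.1 > 10000)).map (fun q => q.2)
  let ends := (pairs.filter (fun q => q.2 - q.1 > 10000)).map (fun q => q.1) ++
    [(PySem.List.pyGet? s (-1)).getD 0]               -- s[-1]
  starts.zip ends

-- ===== PRECONDITION & SPEC =====
-- Pre_: A raises IndexError on the empty list (locs[0]); nothing else is excluded.
def Pre_cut_locs_regions (locs : List Int) : Prop := locs ≠ []
instance (locs : List Int) : Decidable (Pre_cut_locs_regions locs) := by unfold Pre_cut_locs_regions; infer_instance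
def pvWitness_cut_locs_regions : List Int := ([0] : List Int)
def Spec_cut_locs_regions (locs : List Int) (out : List (Int × Int)) : Prop := out = cut_locs_regions_alt locs
instance (locs : List Int) (out : List (Int × Int)) : Decidable (Spec_cut_locs_regions locs out) := by unfold Spec_cut_locs_regions; infer_instance

-- ===== CLAIM =====
def Claim_equal_cut_locs_regions : Prop := ∀ (locs : List Int), Dom_cut_locs_regions locs → Pre_cut_locs_regions locs → Spec_cut_locs_regions locs (cut_locs_regions locs)

-- ===== LEMMAS AND PROOFS =====

-- Recursive characterisation of A's flush loop: regions to come, given the current start and last point e.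
def pvRegions (start e : Int) : List Int → List (Int × Int)
  | [] => [(start, e)]
  | l :: ls => if l > e + 10000 then (start, e) :: pvRegions l l ls else pvRegions start l ls

theorem pvA_fold (ls : List Int) : ∀ (regions : List (Int × Int)) (start e : Int),
    (ls.foldl pvStepA (regions, start, e)).1 ++
      [((ls.foldl pvStepA (regions, start, e)).2.1, (ls.foldl pvStepA (regions, start, e)).2.2)]
    = regions ++ pvRegions start e ls := by
  induction ls with
  | nil => intro regions start e; simp [pvRegions]
  | cons l ls ih =>
    intro regions start e
    simp only [List.foldl_cons, pvRegions, pvStepA]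
    by_cases h : l > e + 10000
    · rw [if_neg (not_not_intro h), if_pos h, ih]; simp
    · rw [if_pos h, if_neg h, ih]

-- B's boundary-zip form computes the same regions: starts are p's successors across gaps, ends are predecessors.
theorem pvB_zip (xs : List Int) : ∀ (start p : Int),
    pvRegions start p xs =
      (start :: (((p :: xs).zip xs).filter (fun q => q.2 - q.1 > 10000)).map (fun q => q.2)).zip
        ((((p :: xs).zip xs).filter (fun q => q.2 - q.1 > 10000)).map (fun q => q.1) ++
          [(p :: xs).getLastD 0]) := by
  induction xs with
  | nil => intro start p; simp [pvRegions]
  | cons l ls ih =>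
    intro start p
    simp only [List.zip_cons_cons, List.filter_cons, pvRegions]
    by_cases h : l > p + 10000
    · rw [if_pos h, if_pos (by simpa using (by omega : l - p > 10000))]
      simp only [List.map_cons, List.zip_cons_cons, List.cons_append]
      rw [ih l l]
      simp
    · rw [if_neg h, if_neg (by simpa using (by omega : ¬ l - p > 10000))]
      rw [ih start l]
      simp

-- ===== VERDICT =====
theorem cut_locs_regions_spec : Claim_equal_cut_locs_regions := by
  intro locs _ hpre
  unfold Spec_cut_locs_regions cut_locs_regions cut_locs_regions_alt
  have hs : PySem.List.sorted locs (fun x => x) ≠ [] := by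
    intro h
    have hp := PySem.List.sorted_perm locs (fun x : Int => x) false
    rw [h] at hp
    exact hpre hp.symm.eq_nil
  cases hsort : PySem.List.sorted locs (fun x => x) with
  | nil => exact absurd hsort hs
  | cons x xs =>
    simp only [PySem.List.pyGet?_zero_cons, PySem.List.pyGet?_neg_one, Option.getD_some,
      List.drop_one, List.tail_cons]
    rw [pvA_fold]
    -- the first loop iteration (l = x, start = e = x) never flushes
    have hfirst : pvRegions x x (x :: xs) = pvRegions x x xs := by
      simp [pvRegions]
    rw [hfirst, pvB_zip xs x x]
    simp [List.getLastD_eq_getLast?]
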